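-- pv_equiv track=rewrite | github.com/jaeminSon/problem_solving | baekjoon/빌라봉.py | retrieve_connected_trees
-- ===== SOURCE A (Python) =====
-- def retrieve_connected_trees(graph, n_nodes):
--
--     def dfs(graph, root):
--         stack = [root]
--         marked = set([root])
--         preorder = []
--         while stack:
--             node = stack.pop()
--             preorder.append(node)
--             for ne in graph[node]:
--                 if ne not in marked:
--                     stack.append(ne)
--                     marked.add(ne)
--         return preorder
--
--     list_roots = []
--     not_marked = set(range(n_nodes))
--     while len(not_marked) > 0:
--         root = not_marked.pop()
--         nodes = dfs(graph, root)
--         list_roots.append(nodes[0]) # root node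
--         not_marked -= set(nodes)
--     return list_roots
-- ===== SOURCE B (Python) =====
-- def retrieve_connected_trees(graph, n_nodes):
--     # One ascending scan over the nodes with a single global visited set:
--     # each unvisited index starts a new component, explored by an iterative
--     # frontier (level-by-level) BFS.  No per-component set, no set subtraction.
--     roots = []
--     visited = set()
--     for i in range(n_nodes):
--         if i not in visited:
--             roots.append(i)
--             visited.add(i)
--             frontier = [i]
--             while frontier:
--                 nxt = []
--                 for node in frontier:
--                     for ne in graph[node]:
--                         if ne not in visited:
--                             visited.add(ne)
--                             nxt.append(ne)
--                 frontier = nxt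
--     return roots
-- ===== Notes on version B (the rewrite author's own statement) =====
-- stated objective: alternative
-- what changed: single ascending scan with one global visited set and an iterative frontier-BFS per component, instead of popping the minimum of a shrinking not_marked set, running a fresh stack-DFS with a per-call marked set, and subtracting the component by set difference
import Mathlib
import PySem

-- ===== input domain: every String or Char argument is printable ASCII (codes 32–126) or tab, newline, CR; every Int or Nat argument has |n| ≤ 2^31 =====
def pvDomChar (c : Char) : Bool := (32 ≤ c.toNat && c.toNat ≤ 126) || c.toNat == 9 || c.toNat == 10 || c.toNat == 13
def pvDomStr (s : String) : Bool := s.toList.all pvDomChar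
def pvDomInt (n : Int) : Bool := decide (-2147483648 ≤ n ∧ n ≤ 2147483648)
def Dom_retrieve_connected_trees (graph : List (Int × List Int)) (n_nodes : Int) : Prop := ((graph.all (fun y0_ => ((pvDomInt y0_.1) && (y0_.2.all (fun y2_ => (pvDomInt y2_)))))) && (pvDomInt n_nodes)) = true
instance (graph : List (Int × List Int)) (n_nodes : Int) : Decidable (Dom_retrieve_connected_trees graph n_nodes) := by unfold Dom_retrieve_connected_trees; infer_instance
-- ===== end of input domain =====

-- B replaces A's pop-the-minimum / per-component DFS / set-subtraction loop by one ascending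
-- scan with a single global visited set and an iterative frontier BFS per component (alternative
-- decomposition; same return value).

-- graph[node]: dict lookup.  A missing key is Python's KeyError, excluded by Pre_ below, so the
-- total form `getD []` is exact on the admitted inputs.
def pvNbrs (graph : List (Int × List Int)) (x : Int) : List Int :=
  (PySem.Dict.get? (PySem.Dict.mk graph) x).getD []

-- ===== PORT A =====
-- A's inner `while stack` loop, fueled (the fuel chosen in dfsA never runs out: every loop turn
-- pops one element and elements are pushed at most once each).  The Python stack (append / pop
-- at the END) is represented reversed, so append = cons and pop = head — only the traversal
-- order is affected by this choice, and A consumes `nodes` only through nodes[0] (= the first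
-- popped node, the root) and set(nodes).
def dfsLoopA (graph : List (Int × List Int)) :
    Nat → List Int → PySem.Set Int → List Int → List Int
  | _, [], _, pre => pre
  | 0, _ :: _, _, pre => pre
  | f+1, node :: stack, marked, pre =>
      let sm := (pvNbrs graph node).foldl
        (fun (sm : List Int × PySem.Set Int) ne =>
          if PySem.Set.contains sm.2 ne then sm else (ne :: sm.1, PySem.Set.add sm.2 ne))
        (stack, marked)
      dfsLoopA graph f sm.1 sm.2 (pre ++ [node])

def dfsA (graph : List (Int × List Int)) (root : Int) : List Int :=
  dfsLoopA graph ((graph.flatMap Prod.snd).length + 2) [root] (PySem.Set.ofList [root]) []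

-- A's outer `while len(not_marked) > 0` loop.  not_marked = set(range(n_nodes)) minus whole
-- components: a CPython set of the small non-negative ints 0..n-1 iterates ascending and
-- set.pop() returns its minimum, so not_marked is kept as a strictly increasing list
-- (pop = head, `-= set(nodes)` = filter).
def outerA (graph : List (Int × List Int)) : List Int → List Int → List Int
  | [], roots => roots
  | root :: rest, roots =>
      let nodes := dfsA graph root
      outerA graph (rest.filter (fun x => !(nodes.contains x)))
        -- nodes[0]; nodes is never empty (its head is root), so the IndexError branch is dead
        (roots ++ [(PySem.List.pyGet? nodes 0).getD 0])
  termination_by nm _ => nm.length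
  decreasing_by simpa using Nat.lt_succ_of_le (List.length_filter_le _ rest.attach)

def retrieve_connected_trees (graph : List (Int × List Int)) (n_nodes : Int) : List Int :=
  outerA graph (PySem.List.pyRange 0 n_nodes 1) []

-- ===== PORT B =====
-- B's inner `while frontier` loop, fueled (the fuel chosen in outerB never runs out: every
-- round with a nonempty frontier either stops next round or adds a node to visited).
def bfsLoopB (graph : List (Int × List Int)) :
    Nat → List Int → PySem.Set Int → PySem.Set Int
  | _, [], visited => visited
  | 0, _ :: _, visited => visited
  | f+1, frontier@(_ :: _), visited =>
      let nv := frontier.foldl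
        (fun (nv : List Int × PySem.Set Int) node =>
          (pvNbrs graph node).foldl
            (fun (nv : List Int × PySem.Set Int) ne =>
              if PySem.Set.contains nv.2 ne then nv else (nv.1 ++ [ne], PySem.Set.add nv.2 ne))
            nv)
        ([], visited)
      bfsLoopB graph f nv.1 nv.2

-- B's `for i in range(n_nodes)` loop over one global visited set.
def outerB (graph : List (Int × List Int)) : List Int → PySem.Set Int → List Int → List Int
  | [], _, roots => roots
  | i :: rest, visited, roots =>
      if PySem.Set.contains visited i then outerB graph rest visited roots
      else outerB graph rest
        (bfsLoopB graph ((graph.flatMap Prod.snd).length + 2) [i] (PySem.Set.add visited i))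
        (roots ++ [i])

def retrieve_connected_trees_alt (graph : List (Int × List Int)) (n_nodes : Int) : List Int :=
  outerB graph (PySem.List.pyRange 0 n_nodes 1) PySem.Set.empty []

-- ===== PRECONDITION & SPEC =====
-- Spec-level reachability closure: all nodes reachable from i following neighbour lists
-- (a missing key contributes no neighbours).  Computed by plain saturation — iterate
-- "add all neighbours" once per candidate node — only to STATE where Python raises; it is
-- not used by any proof and shares no structure with either port's traversal.
def pvReachSet (graph : List (Int × List Int)) (i : Int) : List Int :=
  (List.range (1 + (graph.flatMap Prod.snd).length)).foldl
    (fun S _ => PySem.Set.ofList (S ++ S.flatMap (pvNbrs graph)))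
    [i]

-- A (and B) evaluate graph[node] for every node reachable from 0..n_nodes-1 and raise KeyError
-- when one is not a key of graph; Pre_ admits exactly the inputs where every such node is a key.
-- The leading n_nodes ≤ len(graph) is implied whenever the keys are distinct (a Python dict) and
-- the rest holds; it is stated first so huge n_nodes fail fast.
def Pre_retrieve_connected_trees (graph : List (Int × List Int)) (n_nodes : Int) : Prop :=
  n_nodes ≤ (graph.length : Int) ∧
  (∀ i ∈ PySem.List.pyRange 0 n_nodes 1, ∀ x ∈ pvReachSet graph i,
    (PySem.Dict.get? (PySem.Dict.mk graph) x).isSome)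
instance (graph : List (Int × List Int)) (n_nodes : Int) : Decidable (Pre_retrieve_connected_trees graph n_nodes) := by unfold Pre_retrieve_connected_trees; infer_instance
def pvWitness_retrieve_connected_trees : (List (Int × List Int)) × Int :=
  ([(0, [1]), (1, [0]), (2, [])], 3)

def Spec_retrieve_connected_trees (graph : List (Int × List Int)) (n_nodes : Int) (out : List Int) : Prop := out = retrieve_connected_trees_alt graph n_nodes
instance (graph : List (Int × List Int)) (n_nodes : Int) (out : List Int) : Decidable (Spec_retrieve_connected_trees graph n_nodes out) := by unfold Spec_retrieve_connected_trees; infer_instance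

-- ===== CLAIM (what is proved, stated in full; the proofs are below) =====
def Claim_equal_retrieve_connected_trees : Prop := ∀ (graph : List (Int × List Int)) (n_nodes : Int), Dom_retrieve_connected_trees graph n_nodes → Pre_retrieve_connected_trees graph n_nodes → Spec_retrieve_connected_trees graph n_nodes (retrieve_connected_trees graph n_nodes)

-- ===== LEMMAS AND PROOFS =====

inductive Reach (g : List (Int × List Int)) : Int → Int → Prop
  | refl (x : Int) : Reach g x x
  | tail {x y z : Int} : Reach g x y → z ∈ pvNbrs g y → Reach g x z

inductive ReachA (g : List (Int × List Int)) (V : List Int) : Int → Int → Prop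
  | refl (x : Int) : ReachA g V x x
  | tail {x y z : Int} : ReachA g V x y → z ∈ pvNbrs g y → z ∉ V → ReachA g V x z

theorem ReachA_to_Reach {g : List (Int × List Int)} {V : List Int} {a b : Int}
    (h : ReachA g V a b) : Reach g a b := by
  induction h with
  | refl => exact Reach.refl _
  | tail _ hz _ ih => exact Reach.tail ih hz

theorem ReachA_mono {g : List (Int × List Int)} {V W : List Int} {a b : Int}
    (h : ReachA g W a b) (hVW : ∀ x, x ∈ V → x ∈ W) : ReachA g V a b := by
  induction h with
  | refl => exact ReachA.refl _
  | tail _ hz hnz ih => exact ReachA.tail ih hz (fun hv => hnz (hVW _ hv))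

theorem ReachA_trans {g : List (Int × List Int)} {V : List Int} {a b c : Int}
    (h1 : ReachA g V a b) (h2 : ReachA g V b c) : ReachA g V a c := by
  induction h2 with
  | refl => exact h1
  | tail _ hz hnz ih => exact ReachA.tail ih hz hnz

theorem ReachA_end {g : List (Int × List Int)} {V : List Int} {a b : Int}
    (h : ReachA g V a b) : b = a ∨ b ∉ V := by
  cases h with
  | refl => exact Or.inl rfl
  | tail _ _ hnz => exact Or.inr hnz

theorem pvNbrs_subset_flat {g : List (Int × List Int)} {x z : Int}
    (h : z ∈ pvNbrs g x) : z ∈ g.flatMap Prod.snd := by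
  unfold pvNbrs at h
  cases hg : PySem.Dict.get? (PySem.Dict.mk g) x with
  | none => rw [hg] at h; simp at h
  | some l =>
    rw [hg] at h
    simp at h
    have hm : (x, l) ∈ (PySem.Dict.mk g).items := PySem.Dict.mem_items_of_get?_eq_some _ hg
    have : (x, l) ∈ g := hm
    exact List.mem_flatMap.mpr ⟨(x, l), this, h⟩

theorem reach_root_iff {g : List (Int × List Int)} {root x : Int} :
    ReachA g [root] root x ↔ Reach g root x := by
  constructor
  · exact ReachA_to_Reach
  · intro h
    induction h with
    | refl => exact ReachA.refl _
    | tail _ hz ih =>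
      rename_i y z _
      by_cases hz' : z = root
      · subst hz'; exact ReachA.refl _
      · exact ReachA.tail ih hz (by simp [hz'])

theorem afold_snd_mem (L : List Int) :
    ∀ (S : List Int) (M : PySem.Set Int) (x : Int),
    (x ∈ (L.foldl (fun (sm : List Int × PySem.Set Int) ne =>
        if PySem.Set.contains sm.2 ne then sm else (ne :: sm.1, PySem.Set.add sm.2 ne))
        (S, M)).2 ↔ x ∈ M ∨ x ∈ L) := by
  induction L with
  | nil => intro S M x; simp
  | cons ne L ih =>
    intro S M x
    simp only [List.foldl_cons]
    by_cases h : ne ∈ M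
    · rw [if_pos (by simpa [PySem.Set.contains_iff])]
      rw [ih]
      constructor
      · rintro (hx | hx) <;> simp_all
      · rintro (hx | hx)
        · exact Or.inl hx
        · rcases List.mem_cons.mp hx with rfl | hx
          · exact Or.inl h
          · exact Or.inr hx
    · rw [if_neg (by simpa [PySem.Set.contains_iff])]
      rw [ih]
      simp [PySem.Set.mem_add]
      tauto

theorem afold_fst_mem (L : List Int) :
    ∀ (S : List Int) (M : PySem.Set Int) (x : Int),
    (x ∈ (L.foldl (fun (sm : List Int × PySem.Set Int) ne =>
        if PySem.Set.contains sm.2 ne then sm else (ne :: sm.1, PySem.Set.add sm.2 ne))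
        (S, M)).1 ↔ x ∈ S ∨ (x ∈ L ∧ x ∉ M)) := by
  induction L with
  | nil => intro S M x; simp
  | cons ne L ih =>
    intro S M x
    simp only [List.foldl_cons]
    by_cases h : ne ∈ M
    · rw [if_pos (by simpa [PySem.Set.contains_iff])]
      rw [ih]
      constructor
      · rintro (hx | hx)
        · exact Or.inl hx
        · exact Or.inr ⟨List.mem_cons_of_mem _ hx.1, hx.2⟩
      · rintro (hx | ⟨hx1, hx2⟩)
        · exact Or.inl hx
        · rcases List.mem_cons.mp hx1 with rfl | hx1
          · exact absurd h hx2
          · exact Or.inr ⟨hx1, hx2⟩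
    · rw [if_neg (by simpa [PySem.Set.contains_iff])]
      rw [ih]
      simp only [PySem.Set.mem_add, List.mem_cons]
      by_cases hx : x = ne <;> simp [hx, h]

theorem afold_card (U : List Int) (L : List Int) :
    ∀ (S : List Int) (M : PySem.Set Int), (∀ z ∈ L, z ∈ U) →
    (L.foldl (fun (sm : List Int × PySem.Set Int) ne =>
        if PySem.Set.contains sm.2 ne then sm else (ne :: sm.1, PySem.Set.add sm.2 ne))
        (S, M)).1.length
      + (U.toFinset \ (L.foldl (fun (sm : List Int × PySem.Set Int) ne =>
        if PySem.Set.contains sm.2 ne then sm else (ne :: sm.1, PySem.Set.add sm.2 ne))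
        (S, M)).2.toFinset).card
      ≤ S.length + (U.toFinset \ M.toFinset).card := by
  induction L with
  | nil => intro S M _; simp
  | cons ne L ih =>
    intro S M hLU
    simp only [List.foldl_cons]
    by_cases h : ne ∈ M
    · rw [if_pos (by simpa [PySem.Set.contains_iff])]
      exact ih S M (fun z hz => hLU z (List.mem_cons_of_mem _ hz))
    · rw [if_neg (by simpa [PySem.Set.contains_iff])]
      have hadd : PySem.Set.add M ne = M ++ [ne] := PySem.Set.add_of_not_mem h
      have hUne : ne ∈ U.toFinset \ M.toFinset := by
        simp [List.mem_toFinset, hLU ne (List.mem_cons_self ..), h]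
      have hcard : (U.toFinset \ (PySem.Set.add M ne).toFinset).card
          = (U.toFinset \ M.toFinset).card - 1 := by
        rw [hadd]
        have : (M ++ [ne]).toFinset = insert ne M.toFinset := by
          simp [List.toFinset_append]
          try exact Finset.union_comm _ _
        rw [this, Finset.sdiff_insert, Finset.card_erase_of_mem hUne]
      have hpos : 0 < (U.toFinset \ M.toFinset).card := Finset.card_pos.mpr ⟨ne, hUne⟩
      have := ih (ne :: S) (PySem.Set.add M ne) (fun z hz => hLU z (List.mem_cons_of_mem _ hz))
      rw [hcard] at this
      simp only [List.length_cons] at this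
      omega

theorem stepA_iff (g : List (Int × List Int)) (node : Int) (rest M P S' M' : List Int) (x : Int)
    (hP : ∀ p ∈ P, ∀ z ∈ pvNbrs g p, z ∈ M)
    (hS' : ∀ y : Int, y ∈ S' ↔ y ∈ rest ∨ (y ∈ pvNbrs g node ∧ y ∉ M))
    (hM' : ∀ y : Int, y ∈ M' ↔ y ∈ M ∨ y ∈ pvNbrs g node) :
    (x ∈ P ++ [node] ∨ ∃ s ∈ S', ReachA g M' s x) ↔
      (x ∈ P ∨ ∃ s ∈ node :: rest, ReachA g M s x) := by
  have hMM' : ∀ y : Int, y ∈ M → y ∈ M' := fun y hy => (hM' y).mpr (Or.inl hy)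
  constructor
  · rintro (hx | ⟨s, hs, hr⟩)
    · rcases List.mem_append.mp hx with hx | hx
      · exact Or.inl hx
      · rcases List.mem_singleton.mp hx with rfl
        exact Or.inr ⟨x, List.mem_cons_self .., ReachA.refl _⟩
    · have hr' : ReachA g M s x := ReachA_mono hr hMM'
      rcases (hS' s).mp hs with hs | ⟨hsn, hsM⟩
      · exact Or.inr ⟨s, List.mem_cons_of_mem _ hs, hr'⟩
      · exact Or.inr ⟨node, List.mem_cons_self ..,
          ReachA_trans (ReachA.tail (ReachA.refl node) hsn hsM) hr'⟩
  · rintro (hx | ⟨s, hs, hr⟩)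
    · exact Or.inl (List.mem_append.mpr (Or.inl hx))
    · induction hr with
      | refl =>
        rcases List.mem_cons.mp hs with rfl | hs
        · exact Or.inl (List.mem_append.mpr (Or.inr (List.mem_singleton.mpr rfl)))
        · exact Or.inr ⟨_, (hS' _).mpr (Or.inl hs), ReachA.refl _⟩
      | tail hp hz hzM ih =>
        rename_i y z
        rcases ih with hy | ⟨t, ht, hty⟩
        · rcases List.mem_append.mp hy with hy | hy
          · exact absurd (hP y hy z hz) hzM
          · rcases List.mem_singleton.mp hy with rfl
            exact Or.inr ⟨z, (hS' z).mpr (Or.inr ⟨hz, hzM⟩), ReachA.refl _⟩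
        · by_cases hzM' : z ∈ M'
          · rcases (hM' z).mp hzM' with h | h
            · exact absurd h hzM
            · exact Or.inr ⟨z, (hS' z).mpr (Or.inr ⟨h, hzM⟩), ReachA.refl _⟩
          · exact Or.inr ⟨t, ht, ReachA.tail hty hz hzM'⟩

theorem dfsLoopA_spec (g : List (Int × List Int)) :
    ∀ (f : Nat) (S M P : List Int),
    S.length + ((g.flatMap Prod.snd).toFinset \ M.toFinset).card ≤ f →
    (∀ p ∈ P, ∀ z ∈ pvNbrs g p, z ∈ M) →
    ∀ x : Int, x ∈ dfsLoopA g f S M P ↔ x ∈ P ∨ ∃ s ∈ S, ReachA g M s x := by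
  intro f
  induction f with
  | zero =>
    intro S M P hf hP x
    cases S with
    | nil => simp [dfsLoopA]
    | cons node stack => simp only [List.length_cons] at hf; omega
  | succ f ih =>
    intro S M P hf hP x
    cases S with
    | nil => simp [dfsLoopA]
    | cons node stack =>
      rw [dfsLoopA]
      have hsub : ∀ z ∈ pvNbrs g node, z ∈ g.flatMap Prod.snd := fun z hz => pvNbrs_subset_flat hz
      have hb := afold_card (g.flatMap Prod.snd) (pvNbrs g node) stack M hsub
      simp only [List.length_cons] at hf
      have hP' : ∀ p ∈ P ++ [node], ∀ z ∈ pvNbrs g p, z ∈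
          ((pvNbrs g node).foldl (fun (sm : List Int × PySem.Set Int) ne =>
            if PySem.Set.contains sm.2 ne then sm else (ne :: sm.1, PySem.Set.add sm.2 ne))
            (stack, M)).2 := by
        intro p hp z hz
        rcases List.mem_append.mp hp with hp | hp
        · exact (afold_snd_mem _ _ _ _).mpr (Or.inl (hP p hp z hz))
        · rcases List.mem_singleton.mp hp with rfl
          exact (afold_snd_mem _ _ _ _).mpr (Or.inr hz)
      rw [ih _ _ _ (by omega) hP' x]
      exact stepA_iff g node stack M P _ _ x hP
        (fun y => afold_fst_mem (pvNbrs g node) stack M y)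
        (fun y => afold_snd_mem (pvNbrs g node) stack M y)

theorem dfsLoopA_prefix (g : List (Int × List Int)) :
    ∀ (f : Nat) (S M P : List Int), ∃ t, dfsLoopA g f S M P = P ++ t := by
  intro f
  induction f with
  | zero =>
    intro S M P
    cases S with
    | nil => exact ⟨[], by simp [dfsLoopA]⟩
    | cons node stack => exact ⟨[], by simp [dfsLoopA]⟩
  | succ f ih =>
    intro S M P
    cases S with
    | nil => exact ⟨[], by simp [dfsLoopA]⟩
    | cons node stack =>
      rw [dfsLoopA]
      obtain ⟨t, ht⟩ := ih (((pvNbrs g node).foldl (fun (sm : List Int × PySem.Set Int) ne =>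
            if PySem.Set.contains sm.2 ne then sm else (ne :: sm.1, PySem.Set.add sm.2 ne))
            (stack, M))).1 (((pvNbrs g node).foldl (fun (sm : List Int × PySem.Set Int) ne =>
            if PySem.Set.contains sm.2 ne then sm else (ne :: sm.1, PySem.Set.add sm.2 ne))
            (stack, M))).2 (P ++ [node])
      exact ⟨node :: t, by rw [ht]; simp⟩

theorem dfsA_cons (g : List (Int × List Int)) (root : Int) :
    ∃ t, dfsA g root = root :: t := by
  have h : dfsA g root = dfsLoopA g ((g.flatMap Prod.snd).length + 1 + 1)
      [root] (PySem.Set.ofList [root]) [] := rfl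
  rw [h, dfsLoopA]
  obtain ⟨t, ht⟩ := dfsLoopA_prefix g ((g.flatMap Prod.snd).length + 1) _ _ ([] ++ [root])
  exact ⟨t, by rw [ht]; simp⟩

theorem dfsA_mem (g : List (Int × List Int)) (root x : Int) :
    x ∈ dfsA g root ↔ Reach g root x := by
  have hofl : PySem.Set.ofList [root] = [root] := rfl
  have hcard : ((g.flatMap Prod.snd).toFinset \ (PySem.Set.ofList [root]).toFinset).card
      ≤ (g.flatMap Prod.snd).length :=
    le_trans (Finset.card_le_card (Finset.sdiff_subset)) (List.toFinset_card_le _)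
  have := dfsLoopA_spec g ((g.flatMap Prod.snd).length + 2) [root] (PySem.Set.ofList [root]) []
    (by simp only [List.length_cons, List.length_nil]; omega) (by simp) x
  rw [dfsA, this, hofl]
  simp only [List.not_mem_nil, false_or, List.mem_singleton, exists_eq_left]
  exact reach_root_iff

theorem bifold_snd_mem (L : List Int) :
    ∀ (N : List Int) (W : PySem.Set Int) (x : Int),
    (x ∈ (L.foldl (fun (nv : List Int × PySem.Set Int) ne =>
        if PySem.Set.contains nv.2 ne then nv else (nv.1 ++ [ne], PySem.Set.add nv.2 ne))
        (N, W)).2 ↔ x ∈ W ∨ x ∈ L) := by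
  induction L with
  | nil => intro N W x; simp
  | cons ne L ih =>
    intro N W x
    simp only [List.foldl_cons]
    by_cases h : ne ∈ W
    · rw [if_pos (by simpa [PySem.Set.contains_iff])]
      rw [ih]
      simp only [List.mem_cons]
      constructor
      · tauto
      · rintro (hx | rfl | hx) <;> tauto
    · rw [if_neg (by simpa [PySem.Set.contains_iff])]
      rw [ih]
      simp only [PySem.Set.mem_add, List.mem_cons]
      tauto

theorem bifold_fst_mem (L : List Int) :
    ∀ (N : List Int) (W : PySem.Set Int) (x : Int),
    (x ∈ (L.foldl (fun (nv : List Int × PySem.Set Int) ne =>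
        if PySem.Set.contains nv.2 ne then nv else (nv.1 ++ [ne], PySem.Set.add nv.2 ne))
        (N, W)).1 ↔ x ∈ N ∨ (x ∈ L ∧ x ∉ W)) := by
  induction L with
  | nil => intro N W x; simp
  | cons ne L ih =>
    intro N W x
    simp only [List.foldl_cons]
    by_cases h : ne ∈ W
    · rw [if_pos (by simpa [PySem.Set.contains_iff])]
      rw [ih]
      simp only [List.mem_cons]
      constructor
      · tauto
      · rintro (hx | ⟨(rfl | hx), hW⟩) <;> tauto
    · rw [if_neg (by simpa [PySem.Set.contains_iff])]
      rw [ih]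
      simp only [PySem.Set.mem_add, List.mem_cons, List.mem_append]
      by_cases hx : x = ne <;> simp [hx, h]

theorem bifold_card (U : List Int) (L : List Int) :
    ∀ (N : List Int) (W : PySem.Set Int), (∀ z ∈ L, z ∈ U) →
    (L.foldl (fun (nv : List Int × PySem.Set Int) ne =>
        if PySem.Set.contains nv.2 ne then nv else (nv.1 ++ [ne], PySem.Set.add nv.2 ne))
        (N, W)).1.length
      + (U.toFinset \ (L.foldl (fun (nv : List Int × PySem.Set Int) ne =>
        if PySem.Set.contains nv.2 ne then nv else (nv.1 ++ [ne], PySem.Set.add nv.2 ne))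
        (N, W)).2.toFinset).card
      ≤ N.length + (U.toFinset \ W.toFinset).card := by
  induction L with
  | nil => intro N W _; simp
  | cons ne L ih =>
    intro N W hLU
    simp only [List.foldl_cons]
    by_cases h : ne ∈ W
    · rw [if_pos (by simpa [PySem.Set.contains_iff])]
      exact ih N W (fun z hz => hLU z (List.mem_cons_of_mem _ hz))
    · rw [if_neg (by simpa [PySem.Set.contains_iff])]
      have hadd : PySem.Set.add W ne = W ++ [ne] := PySem.Set.add_of_not_mem h
      have hUne : ne ∈ U.toFinset \ W.toFinset := by
        simp [List.mem_toFinset, hLU ne (List.mem_cons_self ..), h]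
      have hcard : (U.toFinset \ (PySem.Set.add W ne).toFinset).card
          = (U.toFinset \ W.toFinset).card - 1 := by
        rw [hadd]
        have : (W ++ [ne]).toFinset = insert ne W.toFinset := by
          simp [List.toFinset_append]
        rw [this, Finset.sdiff_insert, Finset.card_erase_of_mem hUne]
      have hpos : 0 < (U.toFinset \ W.toFinset).card := Finset.card_pos.mpr ⟨ne, hUne⟩
      have := ih (N ++ [ne]) (PySem.Set.add W ne) (fun z hz => hLU z (List.mem_cons_of_mem _ hz))
      rw [hcard] at this
      simp only [List.length_append, List.length_cons, List.length_nil] at this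
      omega

theorem bofold_snd_mem (g : List (Int × List Int)) (F : List Int) :
    ∀ (N : List Int) (W : PySem.Set Int) (x : Int),
    (x ∈ (F.foldl (fun (nv : List Int × PySem.Set Int) node =>
        (pvNbrs g node).foldl (fun (nv : List Int × PySem.Set Int) ne =>
          if PySem.Set.contains nv.2 ne then nv else (nv.1 ++ [ne], PySem.Set.add nv.2 ne)) nv)
        (N, W)).2 ↔ x ∈ W ∨ ∃ u ∈ F, x ∈ pvNbrs g u) := by
  induction F with
  | nil => intro N W x; simp
  | cons u F ih =>
    intro N W x
    simp only [List.foldl_cons]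
    rw [show ((pvNbrs g u).foldl (fun (nv : List Int × PySem.Set Int) ne =>
          if PySem.Set.contains nv.2 ne then nv else (nv.1 ++ [ne], PySem.Set.add nv.2 ne)) (N, W))
        = (((pvNbrs g u).foldl (fun (nv : List Int × PySem.Set Int) ne =>
          if PySem.Set.contains nv.2 ne then nv else (nv.1 ++ [ne], PySem.Set.add nv.2 ne)) (N, W)).1,
           ((pvNbrs g u).foldl (fun (nv : List Int × PySem.Set Int) ne =>
          if PySem.Set.contains nv.2 ne then nv else (nv.1 ++ [ne], PySem.Set.add nv.2 ne)) (N, W)).2) from rfl]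
    rw [ih]
    rw [bifold_snd_mem]
    simp only [List.mem_cons]
    constructor
    · rintro ((hx | hx) | ⟨v, hv, hxv⟩)
      · exact Or.inl hx
      · exact Or.inr ⟨u, Or.inl rfl, hx⟩
      · exact Or.inr ⟨v, Or.inr hv, hxv⟩
    · rintro (hx | ⟨v, (rfl | hv), hxv⟩)
      · exact Or.inl (Or.inl hx)
      · exact Or.inl (Or.inr hxv)
      · exact Or.inr ⟨v, hv, hxv⟩

theorem bofold_fst_mem (g : List (Int × List Int)) (F : List Int) :
    ∀ (N : List Int) (W : PySem.Set Int) (x : Int),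
    (x ∈ (F.foldl (fun (nv : List Int × PySem.Set Int) node =>
        (pvNbrs g node).foldl (fun (nv : List Int × PySem.Set Int) ne =>
          if PySem.Set.contains nv.2 ne then nv else (nv.1 ++ [ne], PySem.Set.add nv.2 ne)) nv)
        (N, W)).1 ↔ x ∈ N ∨ ((∃ u ∈ F, x ∈ pvNbrs g u) ∧ x ∉ W)) := by
  induction F with
  | nil => intro N W x; simp
  | cons u F ih =>
    intro N W x
    simp only [List.foldl_cons]
    rw [show ((pvNbrs g u).foldl (fun (nv : List Int × PySem.Set Int) ne =>
          if PySem.Set.contains nv.2 ne then nv else (nv.1 ++ [ne], PySem.Set.add nv.2 ne)) (N, W))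
        = (((pvNbrs g u).foldl (fun (nv : List Int × PySem.Set Int) ne =>
          if PySem.Set.contains nv.2 ne then nv else (nv.1 ++ [ne], PySem.Set.add nv.2 ne)) (N, W)).1,
           ((pvNbrs g u).foldl (fun (nv : List Int × PySem.Set Int) ne =>
          if PySem.Set.contains nv.2 ne then nv else (nv.1 ++ [ne], PySem.Set.add nv.2 ne)) (N, W)).2) from rfl]
    rw [ih]
    rw [bifold_fst_mem, bifold_snd_mem]
    simp only [List.mem_cons]
    constructor
    · rintro ((hx | ⟨hxu, hxW⟩) | ⟨⟨v, hv, hxv⟩, hW⟩)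
      · exact Or.inl hx
      · exact Or.inr ⟨⟨u, Or.inl rfl, hxu⟩, hxW⟩
      · exact Or.inr ⟨⟨v, Or.inr hv, hxv⟩, fun hw => hW (Or.inl hw)⟩
    · rintro (hx | ⟨⟨v, (rfl | hv), hxv⟩, hW⟩)
      · exact Or.inl (Or.inl hx)
      · exact Or.inl (Or.inr ⟨hxv, hW⟩)
      · by_cases hxu : x ∈ pvNbrs g u
        · exact Or.inl (Or.inr ⟨hxu, hW⟩)
        · exact Or.inr ⟨⟨v, hv, hxv⟩, fun h => h.elim hW hxu⟩

theorem bofold_card (g : List (Int × List Int)) (F : List Int) :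
    ∀ (N : List Int) (W : PySem.Set Int),
    (F.foldl (fun (nv : List Int × PySem.Set Int) node =>
        (pvNbrs g node).foldl (fun (nv : List Int × PySem.Set Int) ne =>
          if PySem.Set.contains nv.2 ne then nv else (nv.1 ++ [ne], PySem.Set.add nv.2 ne)) nv)
        (N, W)).1.length
      + ((g.flatMap Prod.snd).toFinset \ (F.foldl (fun (nv : List Int × PySem.Set Int) node =>
        (pvNbrs g node).foldl (fun (nv : List Int × PySem.Set Int) ne =>
          if PySem.Set.contains nv.2 ne then nv else (nv.1 ++ [ne], PySem.Set.add nv.2 ne)) nv)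
        (N, W)).2.toFinset).card
      ≤ N.length + ((g.flatMap Prod.snd).toFinset \ W.toFinset).card := by
  induction F with
  | nil => intro N W; simp
  | cons u F ih =>
    intro N W
    simp only [List.foldl_cons]
    rw [show ((pvNbrs g u).foldl (fun (nv : List Int × PySem.Set Int) ne =>
          if PySem.Set.contains nv.2 ne then nv else (nv.1 ++ [ne], PySem.Set.add nv.2 ne)) (N, W))
        = (((pvNbrs g u).foldl (fun (nv : List Int × PySem.Set Int) ne =>
          if PySem.Set.contains nv.2 ne then nv else (nv.1 ++ [ne], PySem.Set.add nv.2 ne)) (N, W)).1,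
           ((pvNbrs g u).foldl (fun (nv : List Int × PySem.Set Int) ne =>
          if PySem.Set.contains nv.2 ne then nv else (nv.1 ++ [ne], PySem.Set.add nv.2 ne)) (N, W)).2) from rfl]
    calc _ ≤ _ := ih _ _
    _ ≤ N.length + ((g.flatMap Prod.snd).toFinset \ W.toFinset).card :=
      bifold_card (g.flatMap Prod.snd) (pvNbrs g u) N W (fun z hz => pvNbrs_subset_flat hz)

theorem roundB_iff (g : List (Int × List Int)) (F W F' W' : List Int) (x : Int)
    (hF : ∀ u ∈ F, u ∈ W)
    (hF' : ∀ y : Int, y ∈ F' ↔ (∃ u ∈ F, y ∈ pvNbrs g u) ∧ y ∉ W)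
    (hW' : ∀ y : Int, y ∈ W' ↔ y ∈ W ∨ ∃ u ∈ F, y ∈ pvNbrs g u) :
    (x ∈ W' ∨ ∃ s ∈ F', ReachA g W' s x) ↔ (x ∈ W ∨ ∃ s ∈ F, ReachA g W s x) := by
  have hWW' : ∀ y : Int, y ∈ W → y ∈ W' := fun y hy => (hW' y).mpr (Or.inl hy)
  constructor
  · rintro (hx | ⟨s, hs, hr⟩)
    · rcases (hW' x).mp hx with hx | ⟨u, hu, hxu⟩
      · exact Or.inl hx
      · by_cases hxW : x ∈ W
        · exact Or.inl hxW
        · exact Or.inr ⟨u, hu, ReachA.tail (ReachA.refl u) hxu hxW⟩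
    · obtain ⟨⟨u, hu, hsu⟩, hsW⟩ := (hF' s).mp hs
      have h1 : ReachA g W u s := ReachA.tail (ReachA.refl u) hsu hsW
      exact Or.inr ⟨u, hu, ReachA_trans h1 (ReachA_mono hr hWW')⟩
  · rintro (hx | ⟨s, hs, hr⟩)
    · exact Or.inl (hWW' x hx)
    · induction hr with
      | refl => exact Or.inl (hWW' s (hF s hs))
      | tail hp hz hzW ih =>
        rename_i y z
        rcases ih with hy | ⟨t, ht, hty⟩
        · by_cases hyW : y ∈ W
          · rcases ReachA_end hp with rfl | hyW'
            · exact Or.inr ⟨z, (hF' z).mpr ⟨⟨y, hs, hz⟩, hzW⟩, ReachA.refl _⟩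
            · exact absurd hyW hyW'
          · have hyF : ∃ u ∈ F, y ∈ pvNbrs g u := ((hW' y).mp hy).resolve_left hyW
            have hyF' : y ∈ F' := (hF' y).mpr ⟨hyF, hyW⟩
            by_cases hzW' : z ∈ W'
            · rcases (hW' z).mp hzW' with h | h
              · exact absurd h hzW
              · exact Or.inr ⟨z, (hF' z).mpr ⟨h, hzW⟩, ReachA.refl _⟩
            · exact Or.inr ⟨y, hyF', ReachA.tail (ReachA.refl y) hz hzW'⟩
        · by_cases hzW' : z ∈ W'
          · rcases (hW' z).mp hzW' with h | h
            · exact absurd h hzW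
            · exact Or.inr ⟨z, (hF' z).mpr ⟨h, hzW⟩, ReachA.refl _⟩
          · exact Or.inr ⟨t, ht, ReachA.tail hty hz hzW'⟩

theorem bfsLoopB_spec (g : List (Int × List Int)) :
    ∀ (f : Nat) (F : List Int) (W : PySem.Set Int),
    F.length + ((g.flatMap Prod.snd).toFinset \ W.toFinset).card ≤ f →
    (∀ u ∈ F, u ∈ W) →
    ∀ x : Int, x ∈ bfsLoopB g f F W ↔ x ∈ W ∨ ∃ s ∈ F, ReachA g W s x := by
  intro f
  induction f with
  | zero =>
    intro F W hf hF x
    cases F with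
    | nil => simp [bfsLoopB]
    | cons u F => simp only [List.length_cons] at hf; omega
  | succ f ih =>
    intro F W hf hF x
    cases F with
    | nil => simp [bfsLoopB]
    | cons u F =>
      rw [bfsLoopB]
      have hb := bofold_card g (u :: F) [] W
      simp only [List.length_nil, Nat.zero_add] at hb
      have hF'spec := bofold_fst_mem g (u :: F) [] W
      have hW'spec := bofold_snd_mem g (u :: F) [] W
      have hF' : ∀ v ∈ ((u :: F).foldl (fun (nv : List Int × PySem.Set Int) node =>
          (pvNbrs g node).foldl (fun (nv : List Int × PySem.Set Int) ne =>
            if PySem.Set.contains nv.2 ne then nv else (nv.1 ++ [ne], PySem.Set.add nv.2 ne)) nv)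
          ([], W)).1, v ∈ ((u :: F).foldl (fun (nv : List Int × PySem.Set Int) node =>
          (pvNbrs g node).foldl (fun (nv : List Int × PySem.Set Int) ne =>
            if PySem.Set.contains nv.2 ne then nv else (nv.1 ++ [ne], PySem.Set.add nv.2 ne)) nv)
          ([], W)).2 := by
        intro v hv
        rcases (hF'spec v).mp hv with h | ⟨h1, _⟩
        · simp at h
        · exact (hW'spec v).mpr (Or.inr h1)
      rw [ih _ _ (by simp only [List.length_cons] at hf; omega) hF' x]
      exact roundB_iff g (u :: F) W _ _ x hF
        (fun y => by rw [hF'spec y]; simp)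
        (fun y => hW'spec y)

theorem avoid_add_iff (g : List (Int × List Int)) (V : PySem.Set Int) (i x : Int)
    (hcl : ∀ y ∈ V, ∀ z ∈ pvNbrs g y, z ∈ V) :
    (x ∈ PySem.Set.add V i ∨ ReachA g (PySem.Set.add V i) i x) ↔ (x ∈ V ∨ Reach g i x) := by
  constructor
  · rintro (hx | hr)
    · rcases (PySem.Set.mem_add _ _ _).mp hx with hx | rfl
      · exact Or.inl hx
      · exact Or.inr (Reach.refl _)
    · exact Or.inr (ReachA_to_Reach hr)
  · rintro (hx | hr)
    · exact Or.inl ((PySem.Set.mem_add _ _ _).mpr (Or.inl hx))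
    · induction hr with
      | refl => exact Or.inr (ReachA.refl _)
      | tail hp hz ih =>
        rename_i y z
        by_cases hzA : z ∈ PySem.Set.add V i
        · rcases (PySem.Set.mem_add _ _ _).mp hzA with hz' | rfl
          · exact Or.inl ((PySem.Set.mem_add _ _ _).mpr (Or.inl hz'))
          · exact Or.inr (ReachA.refl _)
        · rcases ih with hy | hy
          · rcases (PySem.Set.mem_add _ _ _).mp hy with hy' | rfl
            · exact absurd ((PySem.Set.mem_add _ _ _).mpr (Or.inl (hcl y hy' z hz))) hzA
            · exact Or.inr (ReachA.tail (ReachA.refl _) hz hzA)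
          · exact Or.inr (ReachA.tail hy hz hzA)

theorem bfsB_mem (g : List (Int × List Int)) (V : PySem.Set Int) (i x : Int)
    (hcl : ∀ y ∈ V, ∀ z ∈ pvNbrs g y, z ∈ V) :
    x ∈ bfsLoopB g ((g.flatMap Prod.snd).length + 2) [i] (PySem.Set.add V i) ↔
      x ∈ V ∨ Reach g i x := by
  have hcard : ((g.flatMap Prod.snd).toFinset \ (PySem.Set.add V i).toFinset).card
      ≤ (g.flatMap Prod.snd).length :=
    le_trans (Finset.card_le_card (Finset.sdiff_subset)) (List.toFinset_card_le _)
  rw [bfsLoopB_spec g _ [i] (PySem.Set.add V i)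
    (by simp only [List.length_cons, List.length_nil]; omega)
    (fun u hu => by rcases List.mem_singleton.mp hu with rfl
                    exact (PySem.Set.mem_add _ _ _).mpr (Or.inr rfl)) x]
  simp only [List.mem_singleton, exists_eq_left]
  exact avoid_add_iff g V i x hcl

theorem outer_eq (g : List (Int × List Int)) :
    ∀ (L : List Int) (V : PySem.Set Int) (acc : List Int),
    (∀ y ∈ V, ∀ z ∈ pvNbrs g y, z ∈ V) →
    outerA g (L.filter (fun x => !(PySem.Set.contains V x))) acc = outerB g L V acc := by
  intro L
  induction L with
  | nil => intro V acc _; simp [outerA, outerB]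
  | cons i rest ih =>
    intro V acc hcl
    by_cases hi : i ∈ V
    · rw [List.filter_cons_of_neg (by simpa [PySem.Set.contains_iff])]
      rw [outerB, if_pos (by simpa [PySem.Set.contains_iff])]
      exact ih V acc hcl
    · rw [List.filter_cons_of_pos (by simpa [PySem.Set.contains_iff])]
      rw [outerA, outerB, if_neg (by simpa [PySem.Set.contains_iff])]
      obtain ⟨t, ht⟩ := dfsA_cons g i
      have hget : (PySem.List.pyGet? (dfsA g i) 0).getD 0 = i := by
        rw [ht]; simp [PySem.List.pyGet?, PySem.List.pyIdx?]
      rw [hget]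
      have hfilter : (rest.filter (fun x => !(PySem.Set.contains V x))).filter
            (fun x => !((dfsA g i).contains x))
          = rest.filter (fun x => !(PySem.Set.contains
              (bfsLoopB g ((g.flatMap Prod.snd).length + 2) [i] (PySem.Set.add V i)) x)) := by
        rw [List.filter_filter]
        apply List.filter_congr
        intro x _
        apply Bool.eq_iff_iff.mpr
        simp only [Bool.and_eq_true, Bool.not_eq_true', PySem.Set.contains_eq_listContains,
          Bool.eq_false_iff, Ne, List.contains_iff_mem]
        rw [not_iff_not.mpr (dfsA_mem g i x), not_iff_not.mpr (bfsB_mem g V i x hcl)]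
        tauto
      rw [hfilter]
      exact ih _ (acc ++ [i]) (by
        intro y hy z hz
        rcases (bfsB_mem g V i y hcl).mp hy with hyV | hyR
        · exact (bfsB_mem g V i z hcl).mpr (Or.inl (hcl y hyV z hz))
        · exact (bfsB_mem g V i z hcl).mpr (Or.inr (Reach.tail hyR hz)))

-- ===== VERDICT (by name: the statement is the Claim_ definition above) =====
theorem retrieve_connected_trees_spec : Claim_equal_retrieve_connected_trees := by
  intro g n _ _
  unfold Spec_retrieve_connected_trees retrieve_connected_trees retrieve_connected_trees_alt
  rw [← outer_eq g (PySem.List.pyRange 0 n 1) PySem.Set.empty []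
    (by intro y hy; simp [PySem.Set.empty] at hy)]
  congr 1
  simp [PySem.Set.empty]
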